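-- pv_equiv track=rewrite | github.com/Checkmk/checkmk | cmk/base/legacy_checks/db2_version.py | check_db2_version
-- ===== SOURCE A (Python) =====
-- def check_db2_version(item, _no_params, info):
--     for line in info:
--         tokens = line[0].split(" ", 1)
--         if len(tokens) < 2:
--             if item == tokens[0]:
--                 return 3, "No instance information found"
--         else:
--             instance, version = tokens
--             if item == instance:
--                 return 0, version
--
--     return 2, "Instance is down"
-- ===== SOURCE B (Python) =====
-- def check_db2_version(item, _no_params, info):
--     index = {}
--     for line in reversed(info):
--         if line:
--             tokens = line[0].split(" ", 1)
--             index[tokens[0]] = (0, tokens[1]) if len(tokens) == 2 else (3, "No instance information found")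
--     return index.get(item, (2, "Instance is down"))
-- ===== Notes on version B (the rewrite author's own statement) =====
-- stated objective: alternative
-- what changed: Replaces the forward scan with early return by a back-to-front pass that builds an overwrite dict (so the first occurrence of each instance name wins), skipping empty lines, followed by a single dict lookup with the down-default.
import Mathlib
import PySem

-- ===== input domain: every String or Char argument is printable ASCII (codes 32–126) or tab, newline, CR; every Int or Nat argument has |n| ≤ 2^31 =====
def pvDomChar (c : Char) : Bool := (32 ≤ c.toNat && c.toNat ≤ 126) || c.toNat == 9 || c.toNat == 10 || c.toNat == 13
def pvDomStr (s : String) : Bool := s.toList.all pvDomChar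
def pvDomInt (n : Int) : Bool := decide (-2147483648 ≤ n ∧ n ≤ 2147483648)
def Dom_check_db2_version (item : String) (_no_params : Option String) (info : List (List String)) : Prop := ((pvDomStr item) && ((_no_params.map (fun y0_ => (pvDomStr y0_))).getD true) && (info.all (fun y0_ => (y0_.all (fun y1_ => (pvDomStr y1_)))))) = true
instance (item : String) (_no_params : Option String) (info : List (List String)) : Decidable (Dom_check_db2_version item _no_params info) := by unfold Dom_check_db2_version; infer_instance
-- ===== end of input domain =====

-- B builds a first-occurrence-wins index by iterating the lines back to front with overwriting inserts
-- (skipping empty lines), then looks the item up once — instead of A's forward scan with early return.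


-- ===== PORT A =====
-- the for-loop with early return; Python raises IndexError on line[0] of an empty line (excluded by Pre_)
def check_db2_version_go (item : String) : List (List String) → Int × String
  | [] => (2, "Instance is down")
  | line :: rest =>
    match PySem.List.pyGet? line 0 with
    | none => (2, "Instance is down")  -- line[0] raises IndexError in Python; unreachable under Pre_
    | some s =>
      -- tokens = line[0].split(" ", 1); sep ≠ "" so splitMax? is always some
      let tokens := (PySem.Str.splitMax? s " " 1).getD [s]
      match tokens with
      | [t0] => if item == t0 then (3, "No instance information found") else check_db2_version_go item rest
      | t0 :: t1 :: _ => if item == t0 then (0, t1) else check_db2_version_go item rest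
      | [] => check_db2_version_go item rest  -- split never returns []; unreachable

def check_db2_version (item : String) (_no_params : Option String) (info : List (List String)) : Int × String :=
  check_db2_version_go item info

-- ===== PORT B =====
-- body of B's loop: skip an empty line, otherwise overwrite index[tokens[0]]
def check_db2_version_step (d : PySem.Dict String (Int × String)) (line : List String) : PySem.Dict String (Int × String) :=
  match line with
  | [] => d  -- 'if line:' — empty lines are skipped
  | s :: _ =>
    let tokens := (PySem.Str.splitMax? s " " 1).getD [s]
    match tokens with
    | t0 :: t1 :: _ => d.insert t0 (0, t1)
    | [t0] => d.insert t0 (3, "No instance information found")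
    | [] => d  -- split never returns []; unreachable

-- 'for line in reversed(info): …' then 'index.get(item, (2, "Instance is down"))'
def check_db2_version_alt (item : String) (_no_params : Option String) (info : List (List String)) : Int × String :=
  (info.reverse.foldl check_db2_version_step PySem.Dict.empty).getD item (2, "Instance is down")

-- ===== PRECONDITION & SPEC =====
-- does the line's first space-token equal item? (an empty line never matches)
def pvMatches (item : String) (line : List String) : Bool :=
  match line with
  | [] => false
  | s :: _ =>
    match (PySem.Str.splitMax? s " " 1).getD [s] with
    | t0 :: _ => item == t0
    | [] => false

-- Pre_ excludes EXACTLY the inputs on which Python A raises IndexError: those where an empty line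
-- occurs in info before the first line whose first space-token equals item (A's scan reaches it);
-- A returns a value on every other input. B returns its normal lookup result on the excluded inputs.
def Pre_check_db2_version (item : String) (_no_params : Option String) (info : List (List String)) : Prop :=
  [] ∉ info.takeWhile (fun l => !(pvMatches item l))
instance (item : String) (_no_params : Option String) (info : List (List String)) : Decidable (Pre_check_db2_version item _no_params info) := by unfold Pre_check_db2_version; infer_instance
def pvWitness_check_db2_version : String × Option String × List (List String) :=
  ("db2inst1", none, [["db2taskd 10.5.0"], ["db2inst1 11.1.0"], ["db2inst2"]])

def Spec_check_db2_version (item : String) (_no_params : Option String) (info : List (List String)) (out : Int × String) : Prop := out = check_db2_version_alt item _no_params info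
instance (item : String) (_no_params : Option String) (info : List (List String)) (out : Int × String) : Decidable (Spec_check_db2_version item _no_params info out) := by unfold Spec_check_db2_version; infer_instance

-- ===== CLAIM (what is proved, stated in full; the proofs are below) =====
def Claim_equal_check_db2_version : Prop := ∀ (item : String) (_no_params : Option String) (info : List (List String)), Dom_check_db2_version item _no_params info → Pre_check_db2_version item _no_params info → Spec_check_db2_version item _no_params info (check_db2_version item _no_params info)

-- ===== LEMMAS AND PROOFS =====

-- proof-side characterisation: the first match of A's scan, as an Option, skipping empty lines
def pvGoOpt (item : String) : List (List String) → Option (Int × String)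
  | [] => none
  | line :: rest =>
    match line with
    | [] => pvGoOpt item rest
    | s :: _ =>
      match (PySem.Str.splitMax? s " " 1).getD [s] with
      | [t0] => if item == t0 then some (3, "No instance information found") else pvGoOpt item rest
      | t0 :: t1 :: _ => if item == t0 then some (0, t1) else pvGoOpt item rest
      | [] => pvGoOpt item rest

lemma pvGoOpt_append (item : String) (xs ys : List (List String)) :
    pvGoOpt item (xs ++ ys) = (pvGoOpt item xs).or (pvGoOpt item ys) := by
  induction xs with
  | nil => simp [pvGoOpt]
  | cons line rest ih =>
    cases line with
    | nil => simpa [pvGoOpt] using ih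
    | cons s as =>
      simp only [List.cons_append, pvGoOpt]
      cases htok : (PySem.Str.splitMax? s " " 1).getD [s] with
      | nil => simpa using ih
      | cons t0 tl =>
        cases tl with
        | nil =>
          by_cases he : item == t0 <;> simp [he, ih]
        | cons t1 ts =>
          by_cases he : item == t0 <;> simp [he, ih]

lemma step_get? (item : String) (d : PySem.Dict String (Int × String)) (line : List String) :
    (check_db2_version_step d line).get? item = (pvGoOpt item [line]).or (d.get? item) := by
  cases line with
  | nil => simp [check_db2_version_step, pvGoOpt]
  | cons s as =>
    simp only [check_db2_version_step, pvGoOpt]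
    cases htok : (PySem.Str.splitMax? s " " 1).getD [s] with
    | nil => simp
    | cons t0 tl =>
      cases tl with
      | nil =>
        rw [PySem.Dict.get?_insert]
        by_cases he : item = t0
        · simp [he]
        · simp [he, show (item == t0) = false from by simp [he]]
      | cons t1 ts =>
        rw [PySem.Dict.get?_insert]
        by_cases he : item = t0
        · simp [he]
        · simp [he, show (item == t0) = false from by simp [he]]

lemma fold_get? (item : String) (L : List (List String)) (d : PySem.Dict String (Int × String)) :
    (L.foldl check_db2_version_step d).get? item = (pvGoOpt item L.reverse).or (d.get? item) := by
  induction L generalizing d with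
  | nil => simp [pvGoOpt]
  | cons line rest ih =>
    simp only [List.foldl_cons, List.reverse_cons]
    rw [ih, pvGoOpt_append, Option.or_assoc, step_get?]

lemma a_eq_goOpt (item : String) (info : List (List String))
    (h : [] ∉ info.takeWhile (fun l => !(pvMatches item l))) :
    check_db2_version_go item info = (pvGoOpt item info).getD (2, "Instance is down") := by
  induction info with
  | nil => simp [check_db2_version_go, pvGoOpt]
  | cons line rest ih =>
    cases line with
    | nil =>
      exfalso
      apply h
      simp [pvMatches]
    | cons s as =>
      have hget : PySem.List.pyGet? (s :: as) 0 = some s := by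
        simp [PySem.List.pyGet?, PySem.List.pyIdx?]
      simp only [check_db2_version_go, pvGoOpt, hget]
      cases htok : (PySem.Str.splitMax? s " " 1).getD [s] with
      | nil =>
        have hm : pvMatches item (s :: as) = false := by simp [pvMatches, htok]
        apply ih
        intro hmem
        apply h
        simp [hm, hmem]
      | cons t0 tl =>
        have hm : pvMatches item (s :: as) = (item == t0) := by
          cases tl <;> simp [pvMatches, htok]
        cases tl with
        | nil =>
          by_cases he : item == t0
          · simp [he]
          · have hrest : [] ∉ rest.takeWhile (fun l => !(pvMatches item l)) := by
              intro hmem; apply h; simp [hm, he, hmem]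
            simp [he, ih hrest]
        | cons t1 ts =>
          by_cases he : item == t0
          · simp [he]
          · have hrest : [] ∉ rest.takeWhile (fun l => !(pvMatches item l)) := by
              intro hmem; apply h; simp [hm, he, hmem]
            simp [he, ih hrest]

-- ===== VERDICT (by name: the statement is the Claim_ definition above) =====
theorem check_db2_version_spec : Claim_equal_check_db2_version := by
  intro item _no_params info _hdom hpre
  unfold Spec_check_db2_version check_db2_version check_db2_version_alt
  rw [PySem.Dict.getD_eq_get?_getD, fold_get?, List.reverse_reverse, PySem.Dict.get?_empty,
    Option.or_none, a_eq_goOpt item info hpre]
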